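-- pv_equiv track=rewrite | github.com/LuciusSchoenbaum/pypinnch | pypinnch/_impl/types.py | tag_filename
-- ===== SOURCE A (Python) =====
-- def tag_filename(filename, insert):
--     """
--     Tag a filename after it has already been constructed.
--     Useful when multiple filenames are needed that
--     relate to one another.
--     :param filename: (string)
--     a filename.
--     :param insert: (string)
--     a tag to insert, before the ending.
--     """
--     dotsplit = filename.split(".")
--     out = dotsplit[0]
--     if len(dotsplit) > 1:
--         for piece in range(1,len(dotsplit)-1):
--             out += "." + dotsplit[piece]
--         out += "." + insert + "." + dotsplit[-1]
--     else:
--         out += "." + insert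
--     return out
-- ===== SOURCE B (Python) =====
-- def tag_filename(filename, insert):
--     # Single last-dot partition instead of split('.') + rejoin loop.
--     i = filename.rfind(".")
--     if i == -1:
--         return filename + "." + insert
--     return filename[:i] + "." + insert + "." + filename[i + 1:]
-- ===== Notes on version B (the rewrite author's own statement) =====
-- stated objective: simpler
-- what changed: Replaces split('.') plus an index loop that re-joins every piece with a single rfind of the last dot and two slices around it.
import Mathlib
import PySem

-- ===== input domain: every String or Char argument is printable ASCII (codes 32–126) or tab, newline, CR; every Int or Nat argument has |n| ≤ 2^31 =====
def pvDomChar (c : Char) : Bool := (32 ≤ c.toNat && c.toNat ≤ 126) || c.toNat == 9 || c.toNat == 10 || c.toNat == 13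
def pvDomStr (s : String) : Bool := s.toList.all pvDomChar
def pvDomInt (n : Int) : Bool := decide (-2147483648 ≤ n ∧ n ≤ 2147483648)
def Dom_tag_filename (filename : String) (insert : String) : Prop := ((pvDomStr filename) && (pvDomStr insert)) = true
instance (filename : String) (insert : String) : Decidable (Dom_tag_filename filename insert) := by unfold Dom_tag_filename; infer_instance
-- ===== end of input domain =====

-- B replaces A's split('.') + piece-by-piece rejoin loop by one rfind of the last dot
-- and two slices around it (objective: simpler).

-- ===== PORT A =====
-- literal port of A: split on ".", take piece 0, loop over the middle pieces, append tag and last piece.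
-- (dotsplit[0] and dotsplit[-1] cannot raise: split always returns a nonempty list, so pyGetD is exact.)
def tag_filename (filename : String) (insert : String) : String :=
  let dotsplit := PySem.Chars.splitOn filename.toList ['.']
  let out := PySem.List.pyGetD dotsplit 0 []
  if dotsplit.length > 1 then
    let out2 := (PySem.List.pyRange 1 ((dotsplit.length : Int) - 1) 1).foldl
        (fun acc piece => acc ++ '.' :: PySem.List.pyGetD dotsplit piece []) out
    String.ofList (out2 ++ '.' :: insert.toList ++ '.' :: PySem.List.pyGetD dotsplit (-1) [])
  else
    String.ofList (out ++ '.' :: insert.toList)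

-- ===== PORT B =====
-- literal port of Source B: i = filename.rfind("."); slice before/after the last dot.
def tag_filename_alt (filename : String) (insert : String) : String :=
  let i := PySem.Chars.rfind filename.toList ['.']
  if i = -1 then
    String.ofList (filename.toList ++ '.' :: insert.toList)
  else
    String.ofList (PySem.List.slice filename.toList none (some i) ++ '.' :: insert.toList
      ++ '.' :: PySem.List.slice filename.toList (some (i + 1)) none)

-- ===== PRECONDITION & SPEC =====
def Spec_tag_filename (filename : String) (insert : String) (out : String) : Prop := out = tag_filename_alt filename insert
instance (filename : String) (insert : String) (out : String) : Decidable (Spec_tag_filename filename insert out) := by unfold Spec_tag_filename; infer_instance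

-- ===== CLAIM (what is proved, stated in full; the proofs are below) =====
def Claim_equal_tag_filename : Prop := ∀ (filename : String) (insert : String), Dom_tag_filename filename insert → Spec_tag_filename filename insert (tag_filename filename insert)

-- ===== LEMMAS AND PROOFS =====

-- reference split on '.' (used only in the proofs)
def pvSp : List Char → List (List Char)
  | [] => [[]]
  | c :: r => if c = '.' then [] :: pvSp r else (pvSp r).modifyHead (c :: ·)

theorem pvSp_ne_nil (s : List Char) : pvSp s ≠ [] := by
  cases s with
  | nil => simp [pvSp]
  | cons c r =>
    simp only [pvSp]
    split
    · simp
    · cases h : pvSp r with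
      | nil => exact absurd h (pvSp_ne_nil r)
      | cons a t => simp [List.modifyHead]

theorem pvGo_eq (fuel : Nat) (l cur : List Char) (acc : List (List Char))
    (h : l.length ≤ fuel) :
    PySem.Chars.splitOn.go ['.'] fuel l cur acc
      = acc.reverse ++ (pvSp l).modifyHead (cur.reverse ++ ·) := by
  induction fuel generalizing l cur acc with
  | zero =>
    interval_cases hl : l.length
    cases l with
    | nil => simp [PySem.Chars.splitOn.go, pvSp, List.modifyHead]
    | cons c r => simp at hl
  | succ n ih =>
    cases l with
    | nil => simp [PySem.Chars.splitOn.go, pvSp, List.modifyHead]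
    | cons c r =>
      simp only [PySem.Chars.splitOn.go]
      by_cases hc : c = '.'
      · subst hc
        have hpre : ['.'].isPrefixOf ('.' :: r) = true := by simp [List.isPrefixOf]
        rw [if_pos hpre]
        have hdr : List.drop ['.'].length ('.' :: r) = r := rfl
        rw [hdr, ih r [] (cur.reverse :: acc) (by simpa using Nat.le_of_succ_le_succ h)]
        simp only [pvSp, if_pos rfl, List.reverse_cons, List.append_assoc, List.singleton_append]
        cases pvSp r <;> simp [List.modifyHead]
      · have hpre : ['.'].isPrefixOf (c :: r) = false := by
          simp [List.isPrefixOf]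
          exact fun h => hc h.symm
        rw [if_neg (by simp [hpre])]
        rw [ih r (c :: cur) acc (by simpa using Nat.le_of_succ_le_succ h)]
        cases hsp : pvSp r with
        | nil => exact absurd hsp (pvSp_ne_nil r)
        | cons a t => simp [pvSp, hc, hsp, List.modifyHead]

theorem pvSplitOn_eq (s : List Char) : PySem.Chars.splitOn s ['.'] = pvSp s := by
  have := pvGo_eq (s.length + 1) s [] [] (by omega)
  rw [PySem.Chars.splitOn, this]
  have hid : (fun x : List Char => List.reverse [] ++ x) = id := by funext x; simp
  rw [hid, List.modifyHead_id, id_eq, List.reverse_nil, List.nil_append]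
  
-- join with '.' (used only in the proofs)
def pvIc : List (List Char) → List Char
  | [] => []
  | [p] => p
  | p :: ps => p ++ '.' :: pvIc ps

theorem pvSp_no_dot (s : List Char) (h : '.' ∉ s) : pvSp s = [s] := by
  induction s with
  | nil => rfl
  | cons c r ih =>
    have hc : c ≠ '.' := fun hc => h (hc ▸ List.mem_cons_self)
    have hr : '.' ∉ r := fun hr => h (List.mem_cons_of_mem _ hr)
    simp [pvSp, hc, ih hr, List.modifyHead]

theorem pvSp_append (u v : List Char) (hv : '.' ∉ v) :
    pvSp (u ++ '.' :: v) = pvSp u ++ [v] := by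
  induction u with
  | nil => simp [pvSp, pvSp_no_dot v hv]
  | cons c u' ih =>
    by_cases hc : c = '.'
    · subst hc
      simp [pvSp, ih]
    · cases hsp : pvSp u' with
      | nil => exact absurd hsp (pvSp_ne_nil u')
      | cons a t =>
        simp only [List.cons_append, pvSp, if_neg hc, ih, hsp, List.modifyHead]

theorem pvLastDot (s : List Char) (h : '.' ∈ s) :
    ∃ u v, s = u ++ '.' :: v ∧ '.' ∉ v := by
  induction s with
  | nil => cases h
  | cons c r ih =>
    by_cases hr : '.' ∈ r
    · obtain ⟨u, v, huv, hv⟩ := ih hr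
      exact ⟨c :: u, v, by simp [huv], hv⟩
    · have hc : c = '.' := by
        rcases List.mem_cons.mp h with h1 | h2
        · exact h1.symm
        · exact absurd h2 hr
      exact ⟨[], r, by simp [hc], hr⟩

-- the loop: folding "acc ++ '.' :: piece" over the tail re-joins the pieces
theorem pvFold_ic (l : List (List Char)) (a : List Char) :
    l.foldl (fun acc p => acc ++ '.' :: p) a = pvIc (a :: l) := by
  induction l generalizing a with
  | nil => rfl
  | cons p ps ih =>
    rw [List.foldl_cons, ih]
    cases ps <;> simp [pvIc]

theorem pvIc_sp (s : List Char) : pvIc (pvSp s) = s := by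
  induction s with
  | nil => rfl
  | cons c r ih =>
    by_cases hc : c = '.'
    · cases hsp : pvSp r with
      | nil => exact absurd hsp (pvSp_ne_nil r)
      | cons a t =>
        subst hc
        simp only [pvSp, hsp]
        cases t <;> simp_all [pvIc]
    · cases hsp : pvSp r with
      | nil => exact absurd hsp (pvSp_ne_nil r)
      | cons a t =>
        simp only [pvSp, if_neg hc, hsp, List.modifyHead]
        cases t <;> simp_all [pvIc]

-- rfind on ['.']: descending scan
theorem pvRfindGo_none (s : List Char) (j : Nat)
    (h : ∀ k, k ≤ j → ['.'].isPrefixOf (s.drop k) = false) :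
    PySem.Chars.rfind.go s ['.'] j = -1 := by
  induction j with
  | zero =>
    have h0 := h 0 (le_refl 0)
    rw [List.drop_zero] at h0
    simp [PySem.Chars.rfind.go, h0]
  | succ n ih =>
    simp only [PySem.Chars.rfind.go]
    rw [if_neg (by simp [h (n+1) (le_refl _)])]
    exact ih (fun k hk => h k (Nat.le_succ_of_le hk))

theorem pvRfindGo_hit (s : List Char) (j m : Nat) (hm : m ≤ j)
    (hhit : ['.'].isPrefixOf (s.drop m) = true)
    (habove : ∀ k, m < k → k ≤ j → ['.'].isPrefixOf (s.drop k) = false) :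
    PySem.Chars.rfind.go s ['.'] j = m := by
  induction j with
  | zero =>
    interval_cases m
    simpa [PySem.Chars.rfind.go] using hhit
  | succ n ih =>
    simp only [PySem.Chars.rfind.go]
    by_cases hm' : m = n + 1
    · subst hm'; rw [if_pos (by simpa using hhit)]
    · rw [if_neg (by simp [habove (n+1) (by omega) (le_refl _)])]
      exact ih (by omega) (fun k hk1 hk2 => habove k hk1 (Nat.le_succ_of_le hk2))

theorem pvPrefix_dot (s : List Char) (k : Nat) :
    ['.'].isPrefixOf (s.drop k) = true ↔ ∃ v, s.drop k = '.' :: v := by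
  cases h : s.drop k with
  | nil => simp [List.isPrefixOf]
  | cons c r =>
    constructor
    · intro hp
      simp [List.isPrefixOf] at hp
      exact ⟨r, by rw [← hp]⟩
    · rintro ⟨v, hv⟩
      injection hv with h1 h2
      simp [List.isPrefixOf, h1]

theorem pvRfind_no_dot (s : List Char) (h : '.' ∉ s) :
    PySem.Chars.rfind s ['.'] = -1 := by
  apply pvRfindGo_none
  intro k hk
  by_contra hc
  simp only [Bool.not_eq_false] at hc
  obtain ⟨v, hv⟩ := (pvPrefix_dot s k).mp hc
  exact h (List.mem_of_mem_drop (hv ▸ List.mem_cons_self))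

theorem pvRfind_last (u v : List Char) (hv : '.' ∉ v) :
    PySem.Chars.rfind (u ++ '.' :: v) ['.'] = (u.length : Int) := by
  have hlen : (u ++ '.' :: v).length = u.length + v.length + 1 := by simp; omega
  apply pvRfindGo_hit _ _ u.length (by omega)
  · rw [(pvPrefix_dot _ _)]
    exact ⟨v, by simp⟩
  · intro k hk1 hk2
    by_contra hc
    simp only [Bool.not_eq_false] at hc
    obtain ⟨w, hw⟩ := (pvPrefix_dot _ _).mp hc
    have hdrop : (u ++ '.' :: v).drop k = v.drop (k - u.length - 1) := by
      rw [List.drop_append, List.drop_of_length_le (by omega)]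
      have h3 : k - u.length = (k - u.length - 1) + 1 := by omega
      rw [h3, List.drop_succ_cons, List.nil_append]
      congr 1
    have : '.' ∈ v := List.mem_of_mem_drop (by rw [← hdrop, hw]; exact List.mem_cons_self)
    exact hv this

theorem pvGetD_append_left (l : List (List Char)) (v : List Char) (j : Int)
    (h1 : 0 ≤ j) (h2 : j < (l.length : Int)) :
    PySem.List.pyGetD (l ++ [v]) j [] = PySem.List.pyGetD l j [] := by
  obtain ⟨n, rfl⟩ := Int.eq_ofNat_of_zero_le h1
  rw [PySem.List.pyGetD_natCast, PySem.List.pyGetD_natCast]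
  have hn : n < l.length := by exact_mod_cast h2
  simp [List.getD, List.getElem?_append_left hn]

theorem pvGetD_zero (l : List (List Char)) (h : l ≠ []) :
    PySem.List.pyGetD l 0 [] = l.headI := by
  cases l with
  | nil => exact absurd rfl h
  | cons a t =>
    have : PySem.List.pyGetD (a :: t) ((0 : Nat) : Int) [] = (a :: t).getD 0 [] :=
      PySem.List.pyGetD_natCast _ 0 []
    simpa [List.getD] using this

theorem pvGetD_neg_one (l : List (List Char)) (v : List Char) :
    PySem.List.pyGetD (l ++ [v]) (-1) [] = v := by
  have hlen : (l ++ [v]).length = l.length + 1 := by simp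
  simp only [PySem.List.pyGetD, PySem.List.pyGet?, PySem.List.pyIdx?, hlen]
  rw [if_neg (by omega), if_pos (by push_cast; omega)]
  have hk : l.length + 1 - (-(-1 : Int)).toNat = l.length := by simp
  rw [hk]
  simp

-- ===== VERDICT (by name: the statement is the Claim_ definition above) =====
theorem tag_filename_spec : Claim_equal_tag_filename := by
  unfold Claim_equal_tag_filename
  intro filename insert _
  unfold Spec_tag_filename tag_filename tag_filename_alt
  set s := filename.toList with hs
  set t := insert.toList with ht
  by_cases hdot : '.' ∈ s
  · obtain ⟨u, v, huv, hv⟩ := pvLastDot s hdot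
    have hsp : PySem.Chars.splitOn s ['.'] = pvSp u ++ [v] := by
      rw [pvSplitOn_eq, huv, pvSp_append u v hv]
    have hrf : PySem.Chars.rfind s ['.'] = (u.length : Int) := by
      rw [huv]; exact pvRfind_last u v hv
    have hne := pvSp_ne_nil u
    have hlen1 : 1 ≤ (pvSp u).length := List.length_pos_iff.mpr hne
    simp only [hsp, hrf]
    rw [if_pos (by simp; omega)]
    rw [if_neg (by omega)]
    -- A side
    have hbound : ((pvSp u ++ [v]).length : Int) - 1 = PySem.List.len (pvSp u) := by
      simp [PySem.List.len]
    rw [hbound]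
    have hcongr : (PySem.List.pyRange 1 (PySem.List.len (pvSp u)) 1).foldl
        (fun acc piece => acc ++ '.' :: PySem.List.pyGetD (pvSp u ++ [v]) piece [])
        (PySem.List.pyGetD (pvSp u ++ [v]) 0 [])
        = (PySem.List.pyRange 1 (PySem.List.len (pvSp u)) 1).foldl
        (fun acc piece => acc ++ '.' :: PySem.List.pyGetD (pvSp u) piece [])
        (PySem.List.pyGetD (pvSp u ++ [v]) 0 []) := by
      apply PySem.List.foldl_congr_mem
      intro acc j hj
      have hj' := PySem.List.mem_pyRange_one.mp hj
      rw [pvGetD_append_left (pvSp u) v j (by omega) (by simpa [PySem.List.len] using hj'.2)]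
    rw [hcongr]
    have hinit : PySem.List.pyGetD (pvSp u ++ [v]) 0 [] = (pvSp u).headI := by
      rw [pvGetD_append_left (pvSp u) v 0 (le_refl 0) (by exact_mod_cast List.length_pos_iff.mpr hne)]
      exact pvGetD_zero _ hne
    rw [hinit,
      PySem.List.foldl_pyRange_pyGetD (pvSp u) [] (fun acc p => acc ++ '.' :: p) _ (by omega)]
    have hfold : ((pvSp u).drop 1).foldl (fun acc p => acc ++ '.' :: p) ((pvSp u).headI) = u := by
      cases hu : pvSp u with
      | nil => exact absurd hu hne
      | cons a tl =>
        have := pvFold_ic tl a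
        simp only [List.drop_succ_cons, List.drop_zero, List.headI]
        rw [this, ← hu, pvIc_sp]
    have h1nat : (1 : Int).toNat = 1 := rfl
    rw [h1nat, hfold, pvGetD_neg_one]
    -- B side
    rw [PySem.List.slice_to _ (by omega), PySem.List.slice_from _ (by omega)]
    have htake : List.take ((u.length : Int)).toNat s = u := by
      rw [huv]; simp
    have hdrop : List.drop ((u.length : Int) + 1).toNat s = v := by
      rw [huv]
      have : ((u.length : Int) + 1).toNat = u.length + 1 := by omega
      rw [this, List.drop_append, List.drop_of_length_le (by omega)]
      have h4 : u.length + 1 - u.length = 1 := by omega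
      rw [h4, List.drop_succ_cons, List.drop_zero, List.nil_append]
    rw [htake, hdrop]
  · have hsp : PySem.Chars.splitOn s ['.'] = [s] := by
      rw [pvSplitOn_eq, pvSp_no_dot s hdot]
    have hrf : PySem.Chars.rfind s ['.'] = -1 := pvRfind_no_dot s hdot
    simp only [hsp, hrf]
    rw [if_neg (by simp), pvGetD_zero [s] (by simp)]
    simp [List.headI]
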